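-- pv_equiv track=rewrite | github.com/JJMLG/JJMLG | 06.12 ~ 06.18 6월 세째주/B - 바탕화면 정리/동현.py | solution
-- ===== SOURCE A (Python) =====
-- def solution(wallpaper):
--     answer = []
--     pos = []
--
--     for i in range(len(wallpaper)):
--         for j in range(len(wallpaper[i])):
--             if wallpaper[i][j] == '#':
--                 pos.append([i,j])
--
--     maxX = pos[0][0]
--     minX = pos[0][0]
--     maxY = pos[0][1]
--     minY = pos[0][1]
--     for i in pos:
--         if i[0] > maxX:
--             maxX = i[0]
--         if i[0] < minX:
--             minX = i[0]
--         if i[1] > maxY: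
--             maxY = i[1]
--         if i[1] < minY:
--             minY = i[1]
--
--     answer = (minX,minY,maxX+1,maxY+1)
--     return answer
-- ===== SOURCE B (Python) =====
-- def solution(wallpaper):
--     hit = [i for i, row in enumerate(wallpaper) if '#' in row]
--     left = min(row.find('#') for row in wallpaper if '#' in row)
--     right = max(row.rfind('#') for row in wallpaper if '#' in row)
--     return (hit[0], left, hit[-1] + 1, right + 1)
-- ===== Notes on version B (the rewrite author's own statement) =====
-- stated objective: alternative
-- what changed: B works at row granularity instead of cell granularity: it records which rows contain '#' (first/last hit row give the vertical bounds) and asks each hit row for its first and last '#' via str.find/str.rfind, replacing A's per-cell list of [i,j] positions and its four-variable min/max tracking loop.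
import Mathlib
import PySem

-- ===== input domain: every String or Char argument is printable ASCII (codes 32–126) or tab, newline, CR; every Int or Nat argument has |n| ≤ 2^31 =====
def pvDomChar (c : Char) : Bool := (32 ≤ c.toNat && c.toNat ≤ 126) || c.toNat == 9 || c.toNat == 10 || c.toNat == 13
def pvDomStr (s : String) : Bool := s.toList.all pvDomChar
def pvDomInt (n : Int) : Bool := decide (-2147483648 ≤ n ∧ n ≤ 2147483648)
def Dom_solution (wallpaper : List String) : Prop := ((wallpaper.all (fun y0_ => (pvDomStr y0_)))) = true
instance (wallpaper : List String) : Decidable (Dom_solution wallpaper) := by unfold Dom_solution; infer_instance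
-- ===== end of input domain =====

-- B works at row granularity — which rows contain '#' (first/last hit row), and per-row
-- first/last '#' via str.find/str.rfind — instead of A's per-cell [i,j] position list with a
-- four-variable min/max loop; equivalence is about the return value on grids containing at
-- least one '#' (otherwise A raises IndexError).

-- ===== PORT A =====
-- the nested index loops collecting pos = [[i,j] for '#' cells] (indices always in range,
-- so pyGetD's default is never used)
def solutionPos (wallpaper : List String) : List (Int × Int) :=
  (PySem.List.pyRange 0 (wallpaper.length : Int) 1).foldl
    (fun pos i =>
      let row := (PySem.List.pyGetD wallpaper i "").toList
      (PySem.List.pyRange 0 (row.length : Int) 1).foldl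
        (fun pos j =>
          if PySem.List.pyGetD row j ' ' = '#' then pos ++ [(i, j)] else pos)
        pos)
    []

def solution (wallpaper : List String) : Int × Int × Int × Int :=
  let pos := solutionPos wallpaper
  match pos with
  | [] => (0, 0, 0, 0)  -- pos[0][0] raises IndexError in Python; excluded by Pre_solution
  | p :: _ =>
    let st := pos.foldl
      (fun (s : Int × Int × Int × Int) q =>
        let (maxX, minX, maxY, minY) := s
        let maxX := if q.1 > maxX then q.1 else maxX
        let minX := if q.1 < minX then q.1 else minX
        let maxY := if q.2 > maxY then q.2 else maxY
        let minY := if q.2 < minY then q.2 else minY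
        (maxX, minX, maxY, minY))
      (p.1, p.1, p.2, p.2)
    (st.2.1, st.2.2.2, st.1 + 1, st.2.2.1 + 1)

-- ===== PORT B =====
-- hit = [i for i, row in enumerate(wallpaper) if '#' in row]
def hitB (wallpaper : List String) : List Int :=
  (PySem.List.enumerate wallpaper 0).filterMap
    (fun p => if PySem.Str.isIn "#" p.2 then some p.1 else none)

-- left = min(row.find('#') for row in wallpaper if '#' in row)
def leftsB (wallpaper : List String) : List Int :=
  wallpaper.filterMap
    (fun row => if PySem.Str.isIn "#" row then some (PySem.Str.find row "#") else none)

-- right = max(row.rfind('#') for row in wallpaper if '#' in row)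
def rightsB (wallpaper : List String) : List Int :=
  wallpaper.filterMap
    (fun row => if PySem.Str.isIn "#" row then some (PySem.Str.rfind row "#") else none)

def solution_alt (wallpaper : List String) : Int × Int × Int × Int :=
  let hit := hitB wallpaper
  -- hit[0] / hit[-1] / min(...) / max(...) raise in Python on a grid with no '#';
  -- those grids are excluded by Pre_solution
  match PySem.List.pyGet? hit 0, PySem.List.min? (leftsB wallpaper) (fun x => x),
        PySem.List.pyGet? hit (-1), PySem.List.max? (rightsB wallpaper) (fun x => x) with
  | some t, some l, some b, some r => (t, l, b + 1, r + 1)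
  | _, _, _, _ => (0, 0, 0, 0)

-- ===== PRECONDITION & SPEC =====
-- Pre_ excludes exactly the grids with no '#' cell, on which A raises IndexError (pos[0][0]).
def Pre_solution (wallpaper : List String) : Prop :=
  ∃ s ∈ wallpaper, '#' ∈ s.toList
instance (wallpaper : List String) : Decidable (Pre_solution wallpaper) := by
  unfold Pre_solution; infer_instance

def pvWitness_solution : List String := ["..#", "#.."]

def Spec_solution (wallpaper : List String) (out : Int × Int × Int × Int) : Prop := out = solution_alt wallpaper
instance (wallpaper : List String) (out : Int × Int × Int × Int) : Decidable (Spec_solution wallpaper out) := by unfold Spec_solution; infer_instance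

-- ===== CLAIM (what is proved, stated in full; the proofs are below) =====
def Claim_equal_solution : Prop := ∀ (wallpaper : List String), Dom_solution wallpaper → Pre_solution wallpaper → Spec_solution wallpaper (solution wallpaper)

-- ===== LEMMAS AND PROOFS =====

-- ---- characterising A's position list ----

theorem foldl_push {α β : Type} (P : α → Prop) [DecidablePred P] (f : α → β)
    (l : List α) (init : List β) :
    l.foldl (fun acc x => if P x then acc ++ [f x] else acc) init
      = init ++ l.filterMap (fun x => if P x then some (f x) else none) := by
  induction l generalizing init with
  | nil => simp
  | cons x t ih => by_cases h : P x <;> simp [h, ih]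

theorem inner_eq (ws : List String) (i : Int) (init : List (Int × Int)) :
    (PySem.List.pyRange 0 (((PySem.List.pyGetD ws i "").toList).length : Int) 1).foldl
      (fun pos j => if PySem.List.pyGetD (PySem.List.pyGetD ws i "").toList j ' ' = '#'
        then pos ++ [(i, j)] else pos) init
      = init ++ (PySem.List.enumerate (PySem.List.pyGetD ws i "").toList 0).filterMap
          (fun q => if q.2 = '#' then some (i, q.1) else none) := by
  rw [PySem.List.enumerate_eq_map_pyRange _ ' ', List.filterMap_map, foldl_push]
  simp [PySem.List.len]

theorem solutionPos_eq (ws : List String) :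
    solutionPos ws = (PySem.List.enumerate ws 0).flatMap
      (fun p => (PySem.List.enumerate p.2.toList 0).filterMap
        (fun q => if q.2 = '#' then some (p.1, q.1) else none)) := by
  unfold solutionPos
  rw [PySem.List.foldl_congr_mem _ _
    (fun pos i => pos ++ (PySem.List.enumerate (PySem.List.pyGetD ws i "").toList 0).filterMap
      (fun q => if q.2 = '#' then some (i, q.1) else none)) []
    (fun acc x _ => inner_eq ws x acc)]
  rw [PySem.List.foldl_append_eq_flatMap, List.nil_append,
    PySem.List.enumerate_eq_map_pyRange ws "", List.flatMap_map]
  simp [PySem.List.len]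

-- ---- A's min/max loop in closed form ----

theorem iteMax (a x : Int) : (if x > a then x else a) = max a x := by
  split_ifs with h
  · exact (max_eq_right h.le).symm
  · exact (max_eq_left (not_lt.mp h)).symm

theorem iteMin (a x : Int) : (if x < a then x else a) = min a x := by
  split_ifs with h
  · exact (min_eq_right h.le).symm
  · exact (min_eq_left (not_lt.mp h)).symm

theorem fold4' (l : List (Int × Int)) (a b c d : Int) :
    l.foldl (fun (s : Int × Int × Int × Int) q =>
        (max s.1 q.1, min s.2.1 q.1, max s.2.2.1 q.2, min s.2.2.2 q.2)) (a, b, c, d)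
      = ((l.map Prod.fst).foldl max a, (l.map Prod.fst).foldl min b,
         (l.map Prod.snd).foldl max c, (l.map Prod.snd).foldl min d) := by
  induction l generalizing a b c d with
  | nil => simp
  | cons q t ih => simp only [List.foldl_cons, List.map_cons]; exact ih _ _ _ _

theorem fold4 (l : List (Int × Int)) (a b c d : Int) :
    l.foldl
      (fun (s : Int × Int × Int × Int) q =>
        let (maxX, minX, maxY, minY) := s
        let maxX := if q.1 > maxX then q.1 else maxX
        let minX := if q.1 < minX then q.1 else minX
        let maxY := if q.2 > maxY then q.2 else maxY
        let minY := if q.2 < minY then q.2 else minY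
        (maxX, minX, maxY, minY)) (a, b, c, d)
      = ((l.map Prod.fst).foldl max a, (l.map Prod.fst).foldl min b,
         (l.map Prod.snd).foldl max c, (l.map Prod.snd).foldl min d) := by
  have hstep : (fun (s : Int × Int × Int × Int) (q : Int × Int) =>
        let (maxX, minX, maxY, minY) := s
        let maxX := if q.1 > maxX then q.1 else maxX
        let minX := if q.1 < minX then q.1 else minX
        let maxY := if q.2 > maxY then q.2 else maxY
        let minY := if q.2 < minY then q.2 else minY
        ((maxX, minX, maxY, minY) : Int × Int × Int × Int))
      = (fun (s : Int × Int × Int × Int) q =>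
        (max s.1 q.1, min s.2.1 q.1, max s.2.2.1 q.2, min s.2.2.2 q.2)) := by
    funext s q
    obtain ⟨a, b, c, d⟩ := s
    simp only [iteMax, iteMin]
  rw [hstep]
  exact fold4' l a b c d

-- ---- single-character string facts ----

theorem singleton_prefix_iff {α : Type} (a : α) (l : List α) :
    [a] <+: l ↔ l.head? = some a := by
  constructor
  · rintro ⟨t, rfl⟩; rfl
  · intro h; cases l with
    | nil => simp at h
    | cons x t => simp at h; exact ⟨t, by simp [h]⟩

theorem singleton_infix_iff {α : Type} (a : α) (l : List α) :
    [a] <:+: l ↔ a ∈ l := by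
  constructor
  · intro h; simpa using List.IsInfix.sublist h
  · intro h
    obtain ⟨s, t, rfl⟩ := List.append_of_mem h
    exact ⟨s, t, by simp⟩

theorem isIn_hash (row : String) : PySem.Str.isIn "#" row = true ↔ '#' ∈ row.toList := by
  show PySem.Chars.isIn "#".toList row.toList = true ↔ _
  rw [show "#".toList = ['#'] from rfl, PySem.Chars.isIn_iff_infix, singleton_infix_iff]

-- ColOf l j : j is (as an Int) the index of a '#' in l
def ColOf (l : List Char) (j : Int) : Prop :=
  0 ≤ j ∧ ['#'] <+: l.drop j.toNat

theorem colOf_iff (l : List Char) (j : Int) :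
    ColOf l j ↔ ∃ q ∈ PySem.List.enumerate l 0, q.2 = '#' ∧ j = q.1 := by
  constructor
  · rintro ⟨hj, hpre⟩
    rw [singleton_prefix_iff, List.head?_drop] at hpre
    have hlt : j.toNat < l.length := by
      by_contra h
      rw [List.getElem?_eq_none (by omega)] at hpre
      exact absurd hpre (by simp)
    refine ⟨(j, '#'), ?_, rfl, rfl⟩
    rw [PySem.List.mem_enumerate_iff]
    refine ⟨j.toNat, hlt, ?_⟩
    have : l[j.toNat] = '#' := by
      have := List.getElem?_eq_getElem hlt
      rw [this] at hpre; exact Option.some.inj hpre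
    simp [this, Int.toNat_of_nonneg hj]
  · rintro ⟨q, hq, hq2, rfl⟩
    rw [PySem.List.mem_enumerate_iff] at hq
    obtain ⟨k, hk, rfl⟩ := hq
    simp only [zero_add]
    refine ⟨Int.natCast_nonneg k, ?_⟩
    rw [singleton_prefix_iff, List.head?_drop, Int.toNat_natCast]
    rw [List.getElem?_eq_getElem hk]
    simpa using hq2

theorem colOf_mem_char {l : List Char} {j : Int} (h : ColOf l j) : '#' ∈ l := by
  rw [colOf_iff] at h
  obtain ⟨q, hq, hq2, _⟩ := h
  have : q.2 ∈ l := by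
    rw [← PySem.List.map_snd_enumerate l 0]
    exact List.mem_map_of_mem hq
  rwa [hq2] at this

theorem find_colOf {row : List Char} (h : '#' ∈ row) :
    ColOf row (PySem.Chars.find row ['#']) := by
  have hnn : 0 ≤ PySem.Chars.find row ['#'] :=
    (PySem.Chars.find_nonneg_iff _ _).mpr ((singleton_infix_iff _ _).mpr h)
  exact ⟨hnn, (PySem.Chars.find_spec hnn).1⟩

theorem find_le_colOf {row : List Char} {j : Int} (h : ColOf row j) :
    PySem.Chars.find row ['#'] ≤ j := by
  obtain ⟨hj0, hpre⟩ := h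
  have h : ColOf row j := ⟨hj0, hpre⟩
  have hnn : 0 ≤ PySem.Chars.find row ['#'] :=
    (PySem.Chars.find_nonneg_iff _ _).mpr ((singleton_infix_iff _ _).mpr (colOf_mem_char h))
  by_contra hlt
  have hjlt : j.toNat < (PySem.Chars.find row ['#']).toNat := by omega
  exact (PySem.Chars.find_spec hnn).2 j.toNat hjlt h.2

-- rfind: specification of the descending scan rfind.go (proved by induction on the fuel)
theorem rfind_go_zero (s sub : List Char) :
    PySem.Chars.rfind.go s sub 0 = if sub.isPrefixOf s then 0 else -1 := rfl

theorem rfind_go_succ (s sub : List Char) (n : Nat) :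
    PySem.Chars.rfind.go s sub (n + 1)
      = if sub.isPrefixOf (s.drop (n + 1)) then ((n : Int) + 1)
        else PySem.Chars.rfind.go s sub n := rfl

theorem rfind_go_spec (s sub : List Char) (n : Nat)
    (h : ∃ j ≤ n, sub <+: s.drop j) :
    0 ≤ PySem.Chars.rfind.go s sub n ∧
    (PySem.Chars.rfind.go s sub n).toNat ≤ n ∧
    sub <+: s.drop (PySem.Chars.rfind.go s sub n).toNat ∧
    (∀ j ≤ n, sub <+: s.drop j → (j : Int) ≤ PySem.Chars.rfind.go s sub n) := by
  induction n with
  | zero =>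
    obtain ⟨j, hj, hpre⟩ := h
    interval_cases j
    rw [rfind_go_zero, if_pos (List.isPrefixOf_iff_prefix.mpr (by simpa using hpre))]
    refine ⟨le_refl _, by simp, by simpa using hpre, ?_⟩
    intro j hj _; interval_cases j; simp
  | succ n ih =>
    rw [rfind_go_succ]
    by_cases hp : sub <+: s.drop (n + 1)
    · rw [if_pos (List.isPrefixOf_iff_prefix.mpr hp)]
      refine ⟨by omega, by omega, ?_, ?_⟩
      · have he : ((n : Int) + 1).toNat = n + 1 := by omega
        rwa [he]
      · intro j hj _; omega
    · rw [if_neg (by simpa [List.isPrefixOf_iff_prefix] using hp)]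
      obtain ⟨j, hj, hpre⟩ := h
      have hjn : j ≤ n := by
        rcases Nat.lt_or_ge j (n + 1) with h' | h'
        · omega
        · exact absurd ((show j = n + 1 by omega) ▸ hpre) hp
      obtain ⟨h1, h2, h3, h4⟩ := ih ⟨j, hjn, hpre⟩
      refine ⟨h1, by omega, h3, ?_⟩
      intro j hj hpre
      rcases Nat.lt_or_ge j (n + 1) with h' | h'
      · exact h4 j (by omega) hpre
      · exact absurd ((show j = n + 1 by omega) ▸ hpre) hp

theorem rfind_eq_go (s sub : List Char) :
    PySem.Chars.rfind s sub = PySem.Chars.rfind.go s sub s.length := rfl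

theorem rfind_colOf {row : List Char} (h : '#' ∈ row) :
    ColOf row (PySem.Chars.rfind row ['#']) := by
  obtain ⟨k, hk, hkv⟩ := List.getElem_of_mem h
  have hpre : ['#'] <+: row.drop k := by
    rw [singleton_prefix_iff, List.head?_drop, List.getElem?_eq_getElem hk]
    simp [hkv]
  have hs := rfind_go_spec row ['#'] row.length ⟨k, hk.le, hpre⟩
  unfold ColOf
  rw [rfind_eq_go]
  exact ⟨hs.1, hs.2.2.1⟩

theorem rfind_ge_colOf {row : List Char} {j : Int} (h : ColOf row j) :
    j ≤ PySem.Chars.rfind row ['#'] := by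
  obtain ⟨hj, hpre⟩ := h
  have hjlen : j.toNat ≤ row.length := by
    by_contra h'
    rw [List.drop_eq_nil_of_le (by omega)] at hpre
    simp at hpre
  have hs := ((rfind_go_spec row ['#'] row.length ⟨j.toNat, hjlen, hpre⟩).2.2.2) j.toNat hjlen hpre
  rw [rfind_eq_go]
  omega

-- ---- membership characterisations ----

-- HitRow ws x : x is (as an Int) the index of a row of ws containing '#'
def HitRow (ws : List String) (x : Int) : Prop :=
  ∃ p ∈ PySem.List.enumerate ws 0, '#' ∈ p.2.toList ∧ x = p.1

theorem mem_pos_iff (ws : List String) (z : Int × Int) :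
    z ∈ solutionPos ws ↔ ∃ p ∈ PySem.List.enumerate ws 0,
      ∃ q ∈ PySem.List.enumerate p.2.toList 0, q.2 = '#' ∧ z = (p.1, q.1) := by
  rw [solutionPos_eq]
  simp only [List.mem_flatMap, List.mem_filterMap]
  constructor
  · rintro ⟨p, hp, q, hq, hz⟩
    by_cases h : q.2 = '#'
    · rw [if_pos h] at hz
      exact ⟨p, hp, q, hq, h, (Option.some.inj hz).symm⟩
    · rw [if_neg h] at hz; exact absurd hz (by simp)
  · rintro ⟨p, hp, q, hq, h, rfl⟩
    exact ⟨p, hp, q, hq, by rw [if_pos h]⟩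

theorem mem_rows_iff (ws : List String) (x : Int) :
    x ∈ (solutionPos ws).map Prod.fst ↔ HitRow ws x := by
  simp only [List.mem_map]
  constructor
  · rintro ⟨z, hz, rfl⟩
    rw [mem_pos_iff] at hz
    obtain ⟨p, hp, q, hq, hc, rfl⟩ := hz
    refine ⟨p, hp, ?_, rfl⟩
    have : q.2 ∈ p.2.toList := by
      rw [← PySem.List.map_snd_enumerate p.2.toList 0]
      exact List.mem_map_of_mem hq
    rwa [hc] at this
  · rintro ⟨p, hp, hc, rfl⟩
    obtain ⟨k, hk, hkv⟩ := List.getElem_of_mem hc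
    have hq : ((k : Int), '#') ∈ PySem.List.enumerate p.2.toList 0 := by
      rw [PySem.List.mem_enumerate_iff]
      exact ⟨k, hk, by simp [hkv]⟩
    exact ⟨(p.1, (k : Int)), (mem_pos_iff ws _).mpr ⟨p, hp, _, hq, rfl, rfl⟩, rfl⟩

theorem mem_cols_iff (ws : List String) (x : Int) :
    x ∈ (solutionPos ws).map Prod.snd ↔ ∃ row ∈ ws, ColOf row.toList x := by
  simp only [List.mem_map]
  constructor
  · rintro ⟨z, hz, rfl⟩
    rw [mem_pos_iff] at hz
    obtain ⟨p, hp, q, hq, hc, rfl⟩ := hz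
    refine ⟨p.2, ?_, (colOf_iff _ _).mpr ⟨q, hq, hc, rfl⟩⟩
    rw [← PySem.List.map_snd_enumerate ws 0]
    exact List.mem_map_of_mem hp
  · rintro ⟨row, hrow, hcol⟩
    rw [← PySem.List.map_snd_enumerate ws 0] at hrow
    obtain ⟨p, hp, rfl⟩ := List.mem_map.mp hrow
    obtain ⟨q, hq, hc, rfl⟩ := (colOf_iff _ _).mp hcol
    exact ⟨(p.1, q.1), (mem_pos_iff ws _).mpr ⟨p, hp, q, hq, hc, rfl⟩, rfl⟩

theorem mem_hit_iff (ws : List String) (x : Int) :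
    x ∈ hitB ws ↔ HitRow ws x := by
  unfold hitB
  simp only [List.mem_filterMap]
  constructor
  · rintro ⟨p, hp, h⟩
    by_cases hin : PySem.Str.isIn "#" p.2 = true
    · rw [if_pos hin] at h
      exact ⟨p, hp, (isIn_hash p.2).mp hin, (Option.some.inj h).symm⟩
    · rw [if_neg hin] at h; exact absurd h (by simp)
  · rintro ⟨p, hp, hc, rfl⟩
    exact ⟨p, hp, by rw [if_pos ((isIn_hash p.2).mpr hc)]⟩

theorem mem_lefts_iff (ws : List String) (x : Int) :
    x ∈ leftsB ws ↔ ∃ row ∈ ws, '#' ∈ row.toList ∧ x = PySem.Str.find row "#" := by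
  unfold leftsB
  simp only [List.mem_filterMap]
  constructor
  · rintro ⟨row, hrow, h⟩
    by_cases hin : PySem.Str.isIn "#" row = true
    · rw [if_pos hin] at h
      exact ⟨row, hrow, (isIn_hash row).mp hin, (Option.some.inj h).symm⟩
    · rw [if_neg hin] at h; exact absurd h (by simp)
  · rintro ⟨row, hrow, hc, rfl⟩
    exact ⟨row, hrow, by rw [if_pos ((isIn_hash row).mpr hc)]⟩

theorem mem_rights_iff (ws : List String) (x : Int) :
    x ∈ rightsB ws ↔ ∃ row ∈ ws, '#' ∈ row.toList ∧ x = PySem.Str.rfind row "#" := by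
  unfold rightsB
  simp only [List.mem_filterMap]
  constructor
  · rintro ⟨row, hrow, h⟩
    by_cases hin : PySem.Str.isIn "#" row = true
    · rw [if_pos hin] at h
      exact ⟨row, hrow, (isIn_hash row).mp hin, (Option.some.inj h).symm⟩
    · rw [if_neg hin] at h; exact absurd h (by simp)
  · rintro ⟨row, hrow, hc, rfl⟩
    exact ⟨row, hrow, by rw [if_pos ((isIn_hash row).mpr hc)]⟩

-- ---- extremum congruence ----

theorem min?_id_congr (l1 l2 : List Int)
    (h1 : ∀ x ∈ l1, ∃ y ∈ l2, y ≤ x) (h2 : ∀ y ∈ l2, ∃ x ∈ l1, x ≤ y) :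
    PySem.List.min? l1 (fun x => x) = PySem.List.min? l2 (fun x => x) := by
  cases e1 : PySem.List.min? l1 (fun x => x) with
  | none =>
    cases e2 : PySem.List.min? l2 (fun x => x) with
    | none => rfl
    | some m2 =>
      obtain ⟨x, hx, _⟩ := h2 m2 (PySem.List.min?_mem e2)
      rw [(PySem.List.min?_eq_none_iff l1 _).mp e1] at hx
      exact absurd hx (List.not_mem_nil)
  | some m1 =>
    cases e2 : PySem.List.min? l2 (fun x => x) with
    | none =>
      obtain ⟨y, hy, _⟩ := h1 m1 (PySem.List.min?_mem e1)
      rw [(PySem.List.min?_eq_none_iff l2 _).mp e2] at hy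
      exact absurd hy (List.not_mem_nil)
    | some m2 =>
      obtain ⟨y, hy, hyx⟩ := h1 m1 (PySem.List.min?_mem e1)
      obtain ⟨x, hx, hxy⟩ := h2 m2 (PySem.List.min?_mem e2)
      have := PySem.List.min?_isMin e2 y hy
      have := PySem.List.min?_isMin e1 x hx
      simp only [Option.some.injEq]
      omega

theorem max?_id_congr (l1 l2 : List Int)
    (h1 : ∀ x ∈ l1, ∃ y ∈ l2, x ≤ y) (h2 : ∀ y ∈ l2, ∃ x ∈ l1, y ≤ x) :
    PySem.List.max? l1 (fun x => x) = PySem.List.max? l2 (fun x => x) := by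
  cases e1 : PySem.List.max? l1 (fun x => x) with
  | none =>
    cases e2 : PySem.List.max? l2 (fun x => x) with
    | none => rfl
    | some m2 =>
      obtain ⟨x, hx, _⟩ := h2 m2 (PySem.List.max?_mem e2)
      rw [(PySem.List.max?_eq_none_iff l1 _).mp e1] at hx
      exact absurd hx (List.not_mem_nil)
  | some m1 =>
    cases e2 : PySem.List.max? l2 (fun x => x) with
    | none =>
      obtain ⟨y, hy, _⟩ := h1 m1 (PySem.List.max?_mem e1)
      rw [(PySem.List.max?_eq_none_iff l2 _).mp e2] at hy
      exact absurd hy (List.not_mem_nil)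
    | some m2 =>
      obtain ⟨y, hy, hyx⟩ := h1 m1 (PySem.List.max?_mem e1)
      obtain ⟨x, hx, hxy⟩ := h2 m2 (PySem.List.max?_mem e2)
      have := PySem.List.max?_isMax e2 y hy
      have := PySem.List.max?_isMax e1 x hx
      simp only [Option.some.injEq]
      omega

-- ---- sorted lists: first element is the min, last is the max ----

theorem foldl_min_of_le (x : Int) (t : List Int) (h : ∀ y ∈ t, x ≤ y) :
    t.foldl min x = x := by
  induction t with
  | nil => rfl
  | cons y t ih =>
    simp only [List.foldl_cons, min_eq_left (h y (List.mem_cons_self))]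
    exact ih (fun z hz => h z (List.mem_cons_of_mem _ hz))

theorem foldl_max_getLast (x : Int) (t : List Int) (h : (x :: t).Pairwise (· ≤ ·)) :
    t.foldl max x = (x :: t).getLast (List.cons_ne_nil x t) := by
  induction t generalizing x with
  | nil => rfl
  | cons y t ih =>
    rw [List.pairwise_cons] at h
    have hxy : x ≤ y := h.1 y (List.mem_cons_self)
    simp only [List.foldl_cons, max_eq_right hxy]
    rw [ih y h.2]
    simp

theorem min?_id_sorted (l : List Int) (h : l.Pairwise (· ≤ ·)) :
    PySem.List.min? l (fun x => x) = PySem.List.pyGet? l 0 := by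
  cases l with
  | nil => rfl
  | cons x t =>
    rw [PySem.List.min?_id_cons,
      foldl_min_of_le x t ((List.pairwise_cons.mp h).1)]
    simp [PySem.List.pyGet?, PySem.List.pyIdx?]

theorem max?_id_sorted (l : List Int) (h : l.Pairwise (· ≤ ·)) :
    PySem.List.max? l (fun x => x) = PySem.List.pyGet? l (-1) := by
  cases l with
  | nil => rfl
  | cons x t =>
    rw [PySem.List.max?_id_cons, foldl_max_getLast x t h]
    have hlen : 0 < (x :: t).length := by simp
    simp only [PySem.List.pyGet?, PySem.List.pyIdx?]
    rw [if_neg (by omega), if_pos (by simp)]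
    simp only [Option.bind_some]
    rw [List.getLast_eq_getElem, List.getElem?_eq_getElem (by omega)]
    congr 2

theorem hit_sorted (ws : List String) : (hitB ws).Pairwise (· ≤ ·) := by
  unfold hitB
  rw [List.pairwise_filterMap]
  refine (PySem.List.pairwise_lt_enumerate ws 0).imp_of_mem ?_
  intro p q _ _ hpq b hb b' hb'
  by_cases h : PySem.Str.isIn "#" p.2 = true
  · rw [if_pos h] at hb
    by_cases h' : PySem.Str.isIn "#" q.2 = true
    · rw [if_pos h'] at hb'
      rw [← Option.some.inj hb, ← Option.some.inj hb']
      exact hpq.le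
    · rw [if_neg h'] at hb'; exact absurd hb' (by simp)
  · rw [if_neg h] at hb; exact absurd hb (by simp)

-- ---- the four component equalities ----

theorem hit_head_eq (ws : List String) :
    PySem.List.pyGet? (hitB ws) 0 = PySem.List.min? ((solutionPos ws).map Prod.fst) (fun x => x) := by
  rw [← min?_id_sorted _ (hit_sorted ws)]
  refine min?_id_congr _ _ ?_ ?_
  · intro x hx
    exact ⟨x, (mem_rows_iff ws x).mpr ((mem_hit_iff ws x).mp hx), le_refl x⟩
  · intro y hy
    exact ⟨y, (mem_hit_iff ws y).mpr ((mem_rows_iff ws y).mp hy), le_refl y⟩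

theorem hit_last_eq (ws : List String) :
    PySem.List.pyGet? (hitB ws) (-1) = PySem.List.max? ((solutionPos ws).map Prod.fst) (fun x => x) := by
  rw [← max?_id_sorted _ (hit_sorted ws)]
  refine max?_id_congr _ _ ?_ ?_
  · intro x hx
    exact ⟨x, (mem_rows_iff ws x).mpr ((mem_hit_iff ws x).mp hx), le_refl x⟩
  · intro y hy
    exact ⟨y, (mem_hit_iff ws y).mpr ((mem_rows_iff ws y).mp hy), le_refl y⟩

theorem lefts_eq (ws : List String) :
    PySem.List.min? (leftsB ws) (fun x => x)
      = PySem.List.min? ((solutionPos ws).map Prod.snd) (fun x => x) := by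
  refine min?_id_congr _ _ ?_ ?_
  · intro x hx
    obtain ⟨row, hrow, hc, rfl⟩ := (mem_lefts_iff ws x).mp hx
    exact ⟨PySem.Str.find row "#", (mem_cols_iff ws _).mpr ⟨row, hrow, find_colOf hc⟩, le_refl _⟩
  · intro y hy
    obtain ⟨row, hrow, hcol⟩ := (mem_cols_iff ws y).mp hy
    refine ⟨PySem.Str.find row "#",
      (mem_lefts_iff ws _).mpr ⟨row, hrow, colOf_mem_char hcol, rfl⟩, find_le_colOf hcol⟩

theorem rights_eq (ws : List String) :
    PySem.List.max? (rightsB ws) (fun x => x)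
      = PySem.List.max? ((solutionPos ws).map Prod.snd) (fun x => x) := by
  refine max?_id_congr _ _ ?_ ?_
  · intro x hx
    obtain ⟨row, hrow, hc, rfl⟩ := (mem_rights_iff ws x).mp hx
    exact ⟨PySem.Str.rfind row "#", (mem_cols_iff ws _).mpr ⟨row, hrow, rfind_colOf hc⟩, le_refl _⟩
  · intro y hy
    obtain ⟨row, hrow, hcol⟩ := (mem_cols_iff ws y).mp hy
    refine ⟨PySem.Str.rfind row "#",
      (mem_rights_iff ws _).mpr ⟨row, hrow, colOf_mem_char hcol, rfl⟩, rfind_ge_colOf hcol⟩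

theorem pos_ne_nil {ws : List String} (h : Pre_solution ws) : solutionPos ws ≠ [] := by
  obtain ⟨s, hs, hc⟩ := h
  intro hnil
  rw [← PySem.List.map_snd_enumerate ws 0] at hs
  obtain ⟨p, hp, rfl⟩ := List.mem_map.mp hs
  obtain ⟨k, hk, hkv⟩ := List.getElem_of_mem hc
  have hq : ((k : Int), '#') ∈ PySem.List.enumerate p.2.toList 0 := by
    rw [PySem.List.mem_enumerate_iff]
    exact ⟨k, hk, by simp [hkv]⟩
  have hmem : (p.1, (k : Int)) ∈ solutionPos ws :=
    (mem_pos_iff ws _).mpr ⟨p, hp, _, hq, rfl, rfl⟩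
  rw [hnil] at hmem
  exact absurd hmem (List.not_mem_nil)

theorem alt_eval (ws : List String) {a b c d : Int}
    (h1 : PySem.List.pyGet? (hitB ws) 0 = some a)
    (h2 : PySem.List.min? (leftsB ws) (fun x => x) = some b)
    (h3 : PySem.List.pyGet? (hitB ws) (-1) = some c)
    (h4 : PySem.List.max? (rightsB ws) (fun x => x) = some d) :
    solution_alt ws = (a, b, c + 1, d + 1) := by
  show (match PySem.List.pyGet? (hitB ws) 0, PySem.List.min? (leftsB ws) (fun x => x),
        PySem.List.pyGet? (hitB ws) (-1), PySem.List.max? (rightsB ws) (fun x => x) with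
    | some t, some l, some b, some r => (t, l, b + 1, r + 1)
    | _, _, _, _ => ((0 : Int), (0 : Int), (0 : Int), (0 : Int))) = (a, b, c + 1, d + 1)
  rw [h1, h2, h3, h4]

-- ===== VERDICT (by name: the statement is the Claim_ definition above) =====
theorem solution_spec : Claim_equal_solution := by
  intro ws _ hpre
  unfold Spec_solution
  cases hpos : solutionPos ws with
  | nil => exact absurd hpos (pos_ne_nil hpre)
  | cons p t =>
    have hA : solution ws = (((t.map Prod.fst).foldl min p.1), ((t.map Prod.snd).foldl min p.2),
        ((t.map Prod.fst).foldl max p.1) + 1, ((t.map Prod.snd).foldl max p.2) + 1) := by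
      show (match solutionPos ws with
        | [] => ((0 : Int), (0 : Int), (0 : Int), (0 : Int))
        | p :: _ =>
          let st := (solutionPos ws).foldl
            (fun (s : Int × Int × Int × Int) (q : Int × Int) =>
              let (maxX, minX, maxY, minY) := s
              let maxX := if q.1 > maxX then q.1 else maxX
              let minX := if q.1 < minX then q.1 else minX
              let maxY := if q.2 > maxY then q.2 else maxY
              let minY := if q.2 < minY then q.2 else minY
              (maxX, minX, maxY, minY))
            (p.1, p.1, p.2, p.2)
          (st.2.1, st.2.2.2, st.1 + 1, st.2.2.1 + 1)) = _
      rw [hpos]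
      simp [fold4]
    have h1 : PySem.List.pyGet? (hitB ws) 0 = some ((t.map Prod.fst).foldl min p.1) := by
      rw [hit_head_eq, hpos, List.map_cons, PySem.List.min?_id_cons]
    have h2 : PySem.List.min? (leftsB ws) (fun x => x) = some ((t.map Prod.snd).foldl min p.2) := by
      rw [lefts_eq, hpos, List.map_cons, PySem.List.min?_id_cons]
    have h3 : PySem.List.pyGet? (hitB ws) (-1) = some ((t.map Prod.fst).foldl max p.1) := by
      rw [hit_last_eq, hpos, List.map_cons, PySem.List.max?_id_cons]
    have h4 : PySem.List.max? (rightsB ws) (fun x => x) = some ((t.map Prod.snd).foldl max p.2) := by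
      rw [rights_eq, hpos, List.map_cons, PySem.List.max?_id_cons]
    rw [hA, alt_eval ws h1 h2 h3 h4]
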